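-- pv_equiv track=rewrite | github.com/D4De/dnn-benchmarks-converter | ptxtf_utils/ptxtf_net.py | natsort
-- ===== SOURCE A (Python) =====
-- from collections import OrderedDict
--
-- def natsort(layers):
--     od = OrderedDict()
--     for layer in layers:
--         if "_" in layer:
--             prefix, suffix = layer.split("_")
--             suffix = int(suffix)
--         else:
--             prefix = layer
--             suffix = -1
--
--         if prefix in od.keys():
--             od[prefix].append(suffix)
--         else:
--             od[prefix] = [suffix]
--
--     new_layers = []
--     for k in od:
--         od[k].sort()
--         new_layers.extend((f"{k}{'_'+str(v) if v>=0 else ''}" for v in od[k]))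
--
--     return new_layers
-- ===== SOURCE B (Python) =====
-- def natsort(layers):
--     pairs = []
--     for layer in layers:
--         if "_" in layer:
--             prefix, suffix = layer.split("_")
--             suffix = int(suffix)
--         else:
--             prefix = layer
--             suffix = -1
--         pairs.append((prefix, suffix))
--
--     order = {}
--     for prefix, _ in pairs:
--         if prefix not in order:
--             order[prefix] = len(order)
--
--     pairs.sort(key=lambda p: (order[p[0]], p[1]))
--     return [f"{p}_{s}" if s >= 0 else p for p, s in pairs]
-- ===== Notes on version B (the rewrite author's own statement) =====
-- stated objective: alternative
-- what changed: Replaces A's OrderedDict of per-prefix buckets with per-bucket sorts by a flat pair list, a first-appearance rank table, and ONE stable global sort keyed by (rank, suffix), rebuilding names in a single comprehension.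
import Mathlib
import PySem

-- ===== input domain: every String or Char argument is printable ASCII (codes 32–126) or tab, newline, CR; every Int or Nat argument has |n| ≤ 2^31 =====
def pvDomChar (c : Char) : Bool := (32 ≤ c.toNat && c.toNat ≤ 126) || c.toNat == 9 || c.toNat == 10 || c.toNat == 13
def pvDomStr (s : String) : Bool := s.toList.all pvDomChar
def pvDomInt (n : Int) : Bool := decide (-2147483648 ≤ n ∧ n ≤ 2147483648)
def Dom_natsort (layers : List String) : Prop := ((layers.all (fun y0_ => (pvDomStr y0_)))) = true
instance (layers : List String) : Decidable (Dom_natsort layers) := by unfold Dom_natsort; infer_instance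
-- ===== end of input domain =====

-- B replaces A's OrderedDict of per-prefix buckets (each sorted separately) by a flat
-- (prefix, suffix) pair list, a first-appearance rank table and ONE stable global sort
-- keyed by (rank, suffix); same return value, similar cost (objective: alternative).

-- ===== PORT A =====
-- shared parse step: both Pythons contain the identical split('_')/int lines
-- (where Python raises ValueError — more than one '_' or a non-int suffix — Pre_ excludes
-- the input; the `.getD 0` / catch-all branches below are never reached inside Pre_)
def pvParse (layer : String) : String × Int :=
  if PySem.Str.isIn "_" layer then
    match PySem.Str.split? layer "_" with
    | some (p :: s :: _) => (p, (PySem.Int.ofStr? s).getD 0)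
    | _ => (layer, -1)
  else (layer, -1)

-- f"{k}{'_'+str(v) if v>=0 else ''}"
def pvFmt (k : String) (v : Int) : String := if v ≥ 0 then k ++ "_" ++ PySem.Int.toStr v else k

def natsort (layers : List String) : List String :=
  let od := layers.foldl (fun (od : PySem.Dict String (List Int)) layer =>
      let ps := pvParse layer
      if od.contains ps.1 then od.modify ps.1 [] (fun l => l ++ [ps.2])
      else od.insert ps.1 [ps.2]) PySem.Dict.empty
  od.items.foldl (fun acc kv =>
      acc ++ (PySem.List.sorted kv.2 (fun v => v) false).map (fun v => pvFmt kv.1 v)) []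

-- ===== PORT B =====
def natsort_alt (layers : List String) : List String :=
  let pairs := layers.map pvParse
  let order := pairs.foldl (fun (d : PySem.Dict String Int) p =>
      if d.contains p.1 then d else d.insert p.1 (d.size : Int)) PySem.Dict.empty
  let sortedPairs := PySem.List.sorted2 pairs (fun p => order.getD p.1 0) (fun p => p.2) false
  sortedPairs.map (fun p => pvFmt p.1 p.2)

-- ===== PRECONDITION & SPEC =====
-- Pre_ excludes exactly the inputs where Python A raises ValueError: a layer with two or
-- more '_' (the two-target unpack fails) or whose suffix part is not a valid int literal.
def pvLayerOk (layer : String) : Bool :=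
  match PySem.Str.split? layer "_" with
  | some [_] => true
  | some [_, s] => (PySem.Int.ofStr? s).isSome
  | _ => false

def Pre_natsort (layers : List String) : Prop := ∀ layer ∈ layers, pvLayerOk layer = true
instance (layers : List String) : Decidable (Pre_natsort layers) := by unfold Pre_natsort; infer_instance

def pvWitness_natsort : List String := ["conv_2", "conv_1", "fc", "conv_10", "fc_3"]

def Spec_natsort (layers : List String) (out : List String) : Prop := out = natsort_alt layers
instance (layers : List String) (out : List String) : Decidable (Spec_natsort layers out) := by unfold Spec_natsort; infer_instance

-- ===== CLAIM (what is proved, stated in full; the proofs are below) =====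
def Claim_equal_natsort : Prop := ∀ (layers : List String), Dom_natsort layers → Pre_natsort layers → Spec_natsort layers (natsort layers)

-- ===== LEMMAS AND PROOFS =====

-- proof-only abbreviations: the first-appearance key list, the per-key suffix buckets,
-- A's bucket dictionary, B's rank table, and their joint characterisation pvFlat
def pvKs (ps : List (String × Int)) : List String := PySem.List.dedup (ps.map Prod.fst)
def pvBucket (ps : List (String × Int)) (k : String) : List Int :=
  (ps.filter (fun q => q.1 == k)).map Prod.snd
def pvBuckets (ps : List (String × Int)) : PySem.Dict String (List Int) :=
  ps.foldl (fun od p => if od.contains p.1 then od.modify p.1 [] (fun l => l ++ [p.2])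
            else od.insert p.1 [p.2]) PySem.Dict.empty
def pvOrder (ps : List (String × Int)) : PySem.Dict String Int :=
  ps.foldl (fun d p => if d.contains p.1 then d else d.insert p.1 (d.size : Int)) PySem.Dict.empty
def pvFlat (ps : List (String × Int)) : List (String × Int) :=
  (pvKs ps).flatMap (fun k => (PySem.List.sorted (pvBucket ps k) (fun v => v) false).map (fun v => (k, v)))

theorem pvKs_append (ps : List (String × Int)) (p : String × Int) :
    pvKs (ps ++ [p]) = if p.1 ∈ pvKs ps then pvKs ps else pvKs ps ++ [p.1] := by
  simp only [pvKs, List.map_append, PySem.List.dedup_eq_ofList, PySem.Set.ofList_eq_foldl,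
    List.foldl_append]
  rw [← PySem.Set.ofList_eq_foldl]
  by_cases h : p.1 ∈ PySem.Set.ofList (List.map Prod.fst ps) <;>
    simp [PySem.Set.add, PySem.Set.contains, h]

theorem pvBucket_append (ps : List (String × Int)) (p : String × Int) (k : String) :
    pvBucket (ps ++ [p]) k = pvBucket ps k ++ (if p.1 == k then [p.2] else []) := by
  simp only [pvBucket, List.filter_append, List.map_append]
  by_cases h : p.1 == k <;> simp [h]

theorem pvBucket_nil_of_not_mem (ps : List (String × Int)) (k : String) (h : k ∉ pvKs ps) :
    pvBucket ps k = [] := by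
  simp only [pvKs, PySem.List.dedup_eq_ofList, PySem.Set.mem_ofList] at h
  simp only [pvBucket, List.map_eq_nil_iff, List.filter_eq_nil_iff]
  intro q hq hk
  exact absurd (beq_iff_eq.mp hk ▸ List.mem_map_of_mem (f := Prod.fst) hq) h

theorem pvBuckets_items (ps : List (String × Int)) :
    (pvBuckets ps).items = (pvKs ps).map (fun k => (k, pvBucket ps k)) := by
  induction ps using List.reverseRecOn with
  | nil => rfl
  | append_singleton ps p ih =>
    have hkeys : (pvBuckets ps).keys = pvKs ps := by
      simp [PySem.Dict.keys, ih, Function.comp_def]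
    have hcont : (pvBuckets ps).contains p.1 = decide (p.1 ∈ pvKs ps) := by
      rw [PySem.Dict.contains_eq_decide_mem_keys, hkeys]
    have hstep : pvBuckets (ps ++ [p]) =
        (if (pvBuckets ps).contains p.1 then
          (pvBuckets ps).modify p.1 [] (fun l => l ++ [p.2])
         else (pvBuckets ps).insert p.1 [p.2]) := by
      simp [pvBuckets, List.foldl_append]
    rw [hstep, pvKs_append]
    by_cases hmem : p.1 ∈ pvKs ps
    all_goals have hc := hcont
    · -- existing key: modify in place
      rw [hc]
      have hget : (pvBuckets ps).getD p.1 [] = pvBucket ps p.1 := by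
        have hnodup : (pvBuckets ps).keys.Nodup := by
          rw [hkeys]; exact PySem.List.nodup_dedup _
        have : (p.1, pvBucket ps p.1) ∈ (pvBuckets ps).items := by
          rw [ih]; exact List.mem_map_of_mem hmem
        exact PySem.Dict.getD_of_mem_items _ this hnodup []
      simp only [hmem, decide_true, if_true, PySem.Dict.modify, hget]
      rw [PySem.Dict.items_insert_of_contains _ _ (by rw [hcont]; simp [hmem]), ih]
      simp only [List.map_map]
      refine List.map_congr_left ?_
      intro k hk
      by_cases hkp : k = p.1 <;>
        simp [Function.comp, hkp, pvBucket_append, beq_iff_eq, Ne.symm]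
    · rw [hc]
      simp only [hmem, decide_false, Bool.false_eq_true, if_false]
      rw [PySem.Dict.items_insert_of_not_contains _ _ (by rw [hcont]; simp [hmem]), ih]
      rw [List.map_append]
      congr 1
      · refine List.map_congr_left ?_
        intro k hk
        have : ¬ (p.1 == k) := by simp [beq_iff_eq]; rintro rfl; exact hmem hk
        simp [pvBucket_append, this]
      · simp [pvBucket_append, pvBucket_nil_of_not_mem ps p.1 hmem]

theorem pvOrder_inv (ps : List (String × Int)) :
    (pvOrder ps).keys = pvKs ps ∧
    (∀ k ∈ pvKs ps, (pvOrder ps).getD k 0 < ((pvOrder ps).size : Int)) ∧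
    (∀ u a v b w, pvKs ps = u ++ a :: v ++ b :: w →
      (pvOrder ps).getD a 0 < (pvOrder ps).getD b 0) := by
  induction ps using List.reverseRecOn with
  | nil =>
    refine ⟨rfl, ?_, ?_⟩
    · intro k hk; simp [pvKs, PySem.List.dedup_eq_ofList] at hk
    · intro u a v b w h; simp [pvKs, PySem.List.dedup_eq_ofList] at h
  | append_singleton ps p ih =>
    obtain ⟨hkeys, hbound, hmono⟩ := ih
    have hcont : (pvOrder ps).contains p.1 = decide (p.1 ∈ pvKs ps) := by
      rw [PySem.Dict.contains_eq_decide_mem_keys, hkeys]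
    have hstep : pvOrder (ps ++ [p]) =
        (if (pvOrder ps).contains p.1 then pvOrder ps
         else (pvOrder ps).insert p.1 ((pvOrder ps).size : Int)) := by
      simp [pvOrder, List.foldl_append]
    rw [hstep, hcont]
    by_cases hmem : p.1 ∈ pvKs ps
    · simp only [hmem, decide_true, if_true, pvKs_append]
      exact ⟨hkeys, hbound, fun u a v b w h => hmono u a v b w (by simpa using h)⟩
    · simp only [hmem, decide_false, Bool.false_eq_true, if_false]
      have hnc : (pvOrder ps).contains p.1 = false := by rw [hcont]; simp [hmem]
      have hsize : ((pvOrder ps).insert p.1 ((pvOrder ps).size : Int)).size = (pvOrder ps).size + 1 := by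
        simp [PySem.Dict.size, PySem.Dict.items_insert_of_not_contains _ _ hnc]
      have hkeys' : ((pvOrder ps).insert p.1 ((pvOrder ps).size : Int)).keys = pvKs ps ++ [p.1] := by
        rw [PySem.Dict.keys_insert_of_not_contains _ _ hnc, hkeys]
      have hgetold : ∀ k ∈ pvKs ps,
          ((pvOrder ps).insert p.1 ((pvOrder ps).size : Int)).getD k 0 = (pvOrder ps).getD k 0 := by
        intro k hk
        have : k ≠ p.1 := by rintro rfl; exact hmem hk
        exact PySem.Dict.getD_insert_of_ne _ _ _ this
      have hgetnew : ((pvOrder ps).insert p.1 ((pvOrder ps).size : Int)).getD p.1 0 = ((pvOrder ps).size : Int) :=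
        PySem.Dict.getD_insert_self _ _ _ _
      rw [pvKs_append, if_neg hmem]
      refine ⟨hkeys', ?_, ?_⟩
      · intro k hk
        rcases List.mem_append.mp hk with hk | hk
        · rw [hgetold k hk, hsize]; push_cast; exact lt_trans (hbound k hk) (by omega)
        · simp only [List.mem_singleton] at hk
          subst hk
          rw [hgetnew, hsize]; push_cast; omega
      · intro u a v b w h
        rcases w.eq_nil_or_concat with rfl | ⟨w', z, rfl⟩
        · -- b is the new key p.1
          have h2 : (u ++ a :: v) ++ [b] = pvKs ps ++ [p.1] := by
            simpa using h.symm
          obtain ⟨h3, h4⟩ := List.append_inj' h2 rfl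
          have hb : b = p.1 := by simpa using h4
          have ha : a ∈ pvKs ps := by rw [← h3]; simp
          rw [hgetold a ha, hb, hgetnew]
          exact hbound a ha
        · have h2 : (u ++ a :: v ++ b :: w') ++ [z] = pvKs ps ++ [p.1] := by
            simpa using h.symm
          obtain ⟨h3, h4⟩ := List.append_inj' h2 rfl
          have ha : a ∈ pvKs ps := by rw [← h3]; simp
          have hb : b ∈ pvKs ps := by rw [← h3]; simp
          rw [hgetold a ha, hgetold b hb]
          exact hmono u a v b w' h3.symm

theorem pvInsertBy_append_left {α : Type} (before : α → α → Bool) (x : α) (l1 l2 : List α)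
    (h : ∀ y ∈ l1, before x y = false) :
    PySem.List.insertBy before x (l1 ++ l2) = l1 ++ PySem.List.insertBy before x l2 := by
  induction l1 with
  | nil => rfl
  | cons y l1 ih =>
    have hy : before x y = false := h y (by simp)
    rw [List.cons_append, PySem.List.insertBy.eq_2, hy]
    simp only [Bool.false_eq_true, if_false, List.cons_append]
    rw [ih (fun z hz => h z (by simp [hz]))]

theorem pvInsertBy_append_right {α : Type} (before : α → α → Bool) (x : α) (l1 l2 : List α)
    (h : ∀ y ∈ l2, before x y = true) :
    PySem.List.insertBy before x (l1 ++ l2) = PySem.List.insertBy before x l1 ++ l2 := by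
  induction l1 with
  | nil =>
    cases l2 with
    | nil => rfl
    | cons z l2 =>
      rw [List.nil_append, PySem.List.insertBy.eq_2, h z (by simp)]
      rfl
  | cons y l1 ih =>
    rw [List.cons_append, PySem.List.insertBy.eq_2, PySem.List.insertBy.eq_2]
    by_cases hy : before x y = true
    · simp [hy]
    · simp only [hy, Bool.false_eq_true, if_false, List.cons_append]
      rw [ih]

theorem pvInsertBy_map {α β : Type} (before : β → β → Bool) (before' : α → α → Bool)
    (f : α → β) (x : α) (ys : List α)
    (h : ∀ y ∈ ys, before (f x) (f y) = before' x y) :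
    PySem.List.insertBy before (f x) (ys.map f) = (PySem.List.insertBy before' x ys).map f := by
  induction ys with
  | nil => rfl
  | cons y ys ih =>
    rw [List.map_cons, PySem.List.insertBy.eq_2, PySem.List.insertBy.eq_2, h y (by simp)]
    by_cases hy : before' x y = true
    · simp [hy]
    · simp only [hy, Bool.false_eq_true, if_false, List.map_cons, List.cons_inj_right]
      exact ih (fun z hz => h z (by simp [hz]))

theorem pvSorted_append_singleton (l : List Int) (v : Int) :
    PySem.List.sorted (l ++ [v]) (fun x => x) false =
    PySem.List.insertBy (fun a b => decide (a < b)) v (PySem.List.sorted l (fun x => x) false) := by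
  rw [PySem.List.sorted_eq_foldl_insertBy, PySem.List.sorted_eq_foldl_insertBy, List.foldl_append]
  rfl

theorem pvSorted2_append {α κ₁ κ₂ : Type} [LT κ₁] [DecidableLT κ₁] [LT κ₂] [DecidableLT κ₂]
    (xs : List α) (x : α) (k1 : α → κ₁) (k2 : α → κ₂) :
    PySem.List.sorted2 (xs ++ [x]) k1 k2 false =
    PySem.List.insertBy
      (fun a b => decide (k1 a < k1 b) || (!decide (k1 b < k1 a) && decide (k2 a < k2 b)))
      x (PySem.List.sorted2 xs k1 k2 false) := by
  simp [PySem.List.sorted2, List.foldl_append]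

theorem pvMain (ps : List (String × Int)) (r : String → Int)
    (hr : ∀ u a v b w, pvKs ps = u ++ a :: v ++ b :: w → r a < r b) :
    PySem.List.sorted2 ps (fun q => r q.1) (fun q => q.2) false = pvFlat ps := by
  induction ps using List.reverseRecOn with
  | nil => rfl
  | append_singleton ps p ih =>
    have hks := pvKs_append ps p
    by_cases hmem : p.1 ∈ pvKs ps
    · rw [if_pos hmem] at hks
      -- ranks strictly increase along pvKs ps = pvKs (ps ++ [p])
      have hr' : ∀ u a v b w, pvKs ps = u ++ a :: v ++ b :: w → r a < r b := by
        intro u a v b w h; exact hr u a v b w (hks.trans h)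
      rw [pvSorted2_append, ih hr']
      obtain ⟨ks1, ks2, hsplit⟩ := List.append_of_mem hmem
      have hnd : (pvKs ps).Nodup := PySem.List.nodup_dedup _
      rw [hsplit] at hnd
      have hnd1 : p.1 ∉ ks1 := fun hx => (List.disjoint_of_nodup_append hnd) hx (by simp)
      have hnd2 : p.1 ∉ ks2 := by
        have := (List.nodup_append.mp hnd).2.1
        exact (List.nodup_cons.mp this).1
      set g := fun k => (PySem.List.sorted (pvBucket ps k) (fun v => v) false).map (fun v => (k, v)) with hg
      set g' := fun k => (PySem.List.sorted (pvBucket (ps ++ [p]) k) (fun v => v) false).map (fun v => (k, v)) with hg'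
      set ltB := fun (a b : String × Int) => decide (r a.1 < r b.1) || (!decide (r b.1 < r a.1) && decide (a.2 < b.2)) with hltB
      have hl1 : ∀ y ∈ ks1.flatMap g, ltB p y = false := by
        intro y hy
        rw [List.mem_flatMap] at hy
        obtain ⟨k, hk, hy⟩ := hy
        rw [hg, List.mem_map] at hy
        obtain ⟨v, hv, rfl⟩ := hy
        obtain ⟨u, t, hkt⟩ := List.append_of_mem hk
        have hlt : r k < r p.1 := hr' u k t p.1 ks2 (by simp [hsplit, hkt])
        simp [hltB, not_lt_of_gt hlt, hlt]
      have hl2 : ∀ y ∈ ks2.flatMap g, ltB p y = true := by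
        intro y hy
        rw [List.mem_flatMap] at hy
        obtain ⟨k, hk, hy⟩ := hy
        rw [hg, List.mem_map] at hy
        obtain ⟨v, hv, rfl⟩ := hy
        obtain ⟨u, t, hkt⟩ := List.append_of_mem hk
        have hlt : r p.1 < r k := hr' ks1 p.1 u k t (by simp [hsplit, hkt])
        simp [hltB, hlt]
      have hflat : pvFlat ps = ks1.flatMap g ++ (g p.1 ++ ks2.flatMap g) := by
        rw [pvFlat, hsplit]
        simp only [List.flatMap_append, List.flatMap_cons]
        rfl
      rw [hflat]
      rw [pvInsertBy_append_left _ _ _ _ hl1]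
      rw [pvInsertBy_append_right _ _ _ _ hl2]
      have hins : PySem.List.insertBy ltB p (g p.1) = g' p.1 := by
        rw [hg, hg']
        have := pvInsertBy_map ltB (fun a b => decide (a < b)) (fun v => (p.1, v)) p.2
          (PySem.List.sorted (pvBucket ps p.1) (fun v => v) false)
          (by intro y hy; simp [hltB])
        simp only at this
        rw [show ((p.1, p.2) : String × Int) = p from rfl] at this
        rw [this, ← pvSorted_append_singleton]
        simp [pvBucket_append]
      rw [hins]
      have hrest1 : ks1.flatMap g = ks1.flatMap g' := by
        refine List.flatMap_congr ?_
        intro k hk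
        have : ¬ (p.1 == k) := by simp [beq_iff_eq]; rintro rfl; exact hnd1 hk
        simp only [hg, hg']
        simp [pvBucket_append, this]
      have hrest2 : ks2.flatMap g = ks2.flatMap g' := by
        refine List.flatMap_congr ?_
        intro k hk
        have : ¬ (p.1 == k) := by simp [beq_iff_eq]; rintro rfl; exact hnd2 hk
        simp only [hg, hg']
        simp [pvBucket_append, this]
      rw [hrest1, hrest2, pvFlat, hks, hsplit]
      simp only [List.flatMap_append, List.flatMap_cons]
      rfl
    · rw [if_neg hmem] at hks
      have hr' : ∀ u a v b w, pvKs ps = u ++ a :: v ++ b :: w → r a < r b := by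
        intro u a v b w h
        exact hr u a v b (w ++ [p.1]) (by simp [hks, h])
      rw [pvSorted2_append, ih hr']
      have hall : ∀ y ∈ pvFlat ps, (fun (a b : String × Int) =>
          decide (r a.1 < r b.1) || (!decide (r b.1 < r a.1) && decide (a.2 < b.2))) p y = false := by
        intro y hy
        rw [pvFlat, List.mem_flatMap] at hy
        obtain ⟨k, hk, hy⟩ := hy
        rw [List.mem_map] at hy
        obtain ⟨v, hv, rfl⟩ := hy
        obtain ⟨u, t, hkt⟩ := List.append_of_mem hk
        have hlt : r k < r p.1 := hr u k t p.1 [] (by simp [hks, hkt])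
        simp [not_lt_of_gt hlt, hlt]
      rw [PySem.List.insertBy_of_forall_not_before _ _ _ hall]
      conv_rhs => rw [pvFlat, hks, List.flatMap_append]
      rw [pvFlat]
      congr 1
      · refine List.flatMap_congr ?_
        intro k hk
        have : ¬ (p.1 == k) := by simp [beq_iff_eq]; rintro rfl; exact hmem hk
        simp [pvBucket_append, this]
      · rw [List.flatMap_cons, List.flatMap_nil, List.append_nil]
        rw [pvBucket_append, pvBucket_nil_of_not_mem ps p.1 hmem]
        simp only [List.nil_append, beq_self_eq_true]
        rfl

theorem pv_natsort_eq (layers : List String) : natsort layers = natsort_alt layers := by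
  have hps : natsort layers = (pvBuckets (layers.map pvParse)).items.foldl
      (fun acc kv => acc ++ (PySem.List.sorted kv.2 (fun v => v) false).map (fun v => pvFmt kv.1 v)) [] := by
    simp only [natsort, pvBuckets, List.foldl_map]
  have halt : natsort_alt layers = (PySem.List.sorted2 (layers.map pvParse)
      (fun p => (pvOrder (layers.map pvParse)).getD p.1 0) (fun p => p.2) false).map
      (fun p => pvFmt p.1 p.2) := by
    simp only [natsort_alt, pvOrder, List.foldl_map]
  obtain ⟨hkeys, hbound, hmono⟩ := pvOrder_inv (layers.map pvParse)
  rw [hps, halt, pvMain (layers.map pvParse) _ (fun u a v b w h => hmono u a v b w h)]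
  rw [PySem.List.foldl_append_eq_flatMap, pvBuckets_items]
  simp [pvFlat, List.flatMap_map, List.map_flatMap, List.map_map, Function.comp_def]

-- ===== VERDICT (by name: the statement is the Claim_ definition above) =====
theorem natsort_spec : Claim_equal_natsort := by
  intro layers _ _
  unfold Spec_natsort
  exact pv_natsort_eq layers
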